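-- pv_equiv track=rewrite | github.com/bllryy/listing-bot | listing-bot/bot/util/get_default_overwrites.py | get_role_config_name
-- ===== SOURCE A (Python) =====
-- def get_role_config_name(ticket_type: str):
--     role_configs_for_specific_ticket_types = {}
--
--     for action in ["buy", "sell"]:
--         for item_type in ["account", "profile", "alt", "mfa"]:
--             role_key = f"{item_type}_seller_role"
--             ticket_key = f"{action}-{item_type}"
--             role_configs_for_specific_ticket_types[ticket_key] = role_key
--
--         role_configs_for_specific_ticket_types[f"{action}-coins"] = "coin_seller_role"
--
--     role_configs_for_specific_ticket_types["middleman"] = "middleman_role"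
--
--     if ticket_type in role_configs_for_specific_ticket_types:
--         return role_configs_for_specific_ticket_types[ticket_type]
--
--     return "seller_role"
-- ===== SOURCE B (Python) =====
-- def _role_for_suffix(suffix):
--     if suffix == "coins":
--         return "coin_seller_role"
--     if suffix in ("account", "profile", "alt", "mfa"):
--         return suffix + "_seller_role"
--     return "seller_role"
--
--
-- def get_role_config_name(ticket_type: str):
--     if ticket_type == "middleman":
--         return "middleman_role"
--     if ticket_type.startswith("buy-"):
--         return _role_for_suffix(ticket_type[4:])
--     if ticket_type.startswith("sell-"):
--         return _role_for_suffix(ticket_type[5:])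
--     return "seller_role"
-- ===== Notes on version B (the rewrite author's own statement) =====
-- stated objective: simpler
-- what changed: Replaces the dict built by nested loops on every call with direct string parsing: strip the action prefix and map the remaining suffix, no table construction.
import Mathlib
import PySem

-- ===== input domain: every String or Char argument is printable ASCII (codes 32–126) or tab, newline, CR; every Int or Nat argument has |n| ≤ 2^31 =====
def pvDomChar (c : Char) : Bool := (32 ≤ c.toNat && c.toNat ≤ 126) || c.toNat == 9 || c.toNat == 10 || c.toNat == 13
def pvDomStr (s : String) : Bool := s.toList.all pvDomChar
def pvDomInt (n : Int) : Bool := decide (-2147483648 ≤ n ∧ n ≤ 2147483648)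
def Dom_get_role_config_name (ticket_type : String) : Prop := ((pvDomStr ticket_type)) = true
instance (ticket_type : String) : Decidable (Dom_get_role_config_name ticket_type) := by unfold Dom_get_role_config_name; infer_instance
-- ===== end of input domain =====

-- B replaces A's per-call construction of an 11-entry dict by direct parsing of the
-- ticket type (strip the action prefix and map the remaining suffix); same return value.


-- ===== PORT A =====
def get_role_config_name (ticket_type : String) : String :=
  let role_configs : PySem.Dict String String :=
    (["buy", "sell"] : List String).foldl (fun d action =>
      let d := (["account", "profile", "alt", "mfa"] : List String).foldl
        (fun d item_type => d.insert (action ++ "-" ++ item_type) (item_type ++ "_seller_role")) d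
      d.insert (action ++ "-coins") "coin_seller_role") PySem.Dict.empty
  let role_configs := role_configs.insert "middleman" "middleman_role"
  if role_configs.contains ticket_type then (role_configs.get? ticket_type).getD "seller_role"
  else "seller_role"

-- ===== PORT B =====
def pvRoleForSuffix (suffix : String) : String :=
  if suffix == "coins" then "coin_seller_role"
  else if (["account", "profile", "alt", "mfa"] : List String).contains suffix then
    suffix ++ "_seller_role"
  else "seller_role"

def get_role_config_name_alt (ticket_type : String) : String :=
  if ticket_type == "middleman" then "middleman_role"
  else if PySem.Str.startswith ticket_type "buy-" then
    pvRoleForSuffix (PySem.Str.slice ticket_type (some 4) none)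
  else if PySem.Str.startswith ticket_type "sell-" then
    pvRoleForSuffix (PySem.Str.slice ticket_type (some 5) none)
  else "seller_role"

-- ===== PRECONDITION & SPEC =====
def Spec_get_role_config_name (ticket_type : String) (out : String) : Prop := out = get_role_config_name_alt ticket_type
instance (ticket_type : String) (out : String) : Decidable (Spec_get_role_config_name ticket_type out) := by unfold Spec_get_role_config_name; infer_instance

-- ===== CLAIM (what is proved, stated in full; the proofs are below) =====
def Claim_equal_get_role_config_name : Prop := ∀ (ticket_type : String), Dom_get_role_config_name ticket_type → Spec_get_role_config_name ticket_type (get_role_config_name ticket_type)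

-- ===== LEMMAS AND PROOFS =====

-- the dict A builds, evaluated to a literal (definitional)
def pvLit : PySem.Dict String String := PySem.Dict.mk
  [("buy-account","account_seller_role"),("buy-profile","profile_seller_role"),
   ("buy-alt","alt_seller_role"),("buy-mfa","mfa_seller_role"),("buy-coins","coin_seller_role"),
   ("sell-account","account_seller_role"),("sell-profile","profile_seller_role"),
   ("sell-alt","alt_seller_role"),("sell-mfa","mfa_seller_role"),("sell-coins","coin_seller_role"),
   ("middleman","middleman_role")]

theorem pv_A_eval (t : String) :
    get_role_config_name t =
      if pvLit.contains t then (pvLit.get? t).getD "seller_role" else "seller_role" := rfl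

theorem pv_buy_decomp (t : String) (h : PySem.Str.startswith t "buy-" = true) :
    t = "buy-" ++ PySem.Str.slice t (some 4) none := by
  simp only [PySem.Str.startswith_eq, PySem.Chars.startswith_iff] at h
  obtain ⟨r, hr⟩ := h
  have h2 : (PySem.Str.slice t (some 4) none).toList = t.toList.drop 4 := by
    simp [PySem.Str.slice, PySem.Chars.slice_eq_listSlice,
      PySem.List.slice_from (xs := t.toList) (a := 4) (by norm_num)]
  apply String.toList_inj.mp
  rw [String.toList_append, h2, ← hr]
  simp

theorem pv_sell_decomp (t : String) (h : PySem.Str.startswith t "sell-" = true) :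
    t = "sell-" ++ PySem.Str.slice t (some 5) none := by
  simp only [PySem.Str.startswith_eq, PySem.Chars.startswith_iff] at h
  obtain ⟨r, hr⟩ := h
  have h2 : (PySem.Str.slice t (some 5) none).toList = t.toList.drop 5 := by
    simp [PySem.Str.slice, PySem.Chars.slice_eq_listSlice,
      PySem.List.slice_from (xs := t.toList) (a := 5) (by norm_num)]
  apply String.toList_inj.mp
  rw [String.toList_append, h2, ← hr]
  simp

theorem pv_main_buy (s : String) : get_role_config_name ("buy-" ++ s) = pvRoleForSuffix s := by
  by_cases e1 : s = "account"; · subst e1; decide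
  by_cases e2 : s = "profile"; · subst e2; decide
  by_cases e3 : s = "alt"; · subst e3; decide
  by_cases e4 : s = "mfa"; · subst e4; decide
  by_cases e5 : s = "coins"; · subst e5; decide
  rw [pv_A_eval]
  have n1 : ¬ (("buy-account" : String) = "buy-" ++ s) := by
    intro h; have := congrArg String.toList h; simp at this
    exact e1 (String.toList_inj.mp (by simp [this.symm]))
  have n2 : ¬ (("buy-profile" : String) = "buy-" ++ s) := by
    intro h; have := congrArg String.toList h; simp at this
    exact e2 (String.toList_inj.mp (by simp [this.symm]))
  have n3 : ¬ (("buy-alt" : String) = "buy-" ++ s) := by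
    intro h; have := congrArg String.toList h; simp at this
    exact e3 (String.toList_inj.mp (by simp [this.symm]))
  have n4 : ¬ (("buy-mfa" : String) = "buy-" ++ s) := by
    intro h; have := congrArg String.toList h; simp at this
    exact e4 (String.toList_inj.mp (by simp [this.symm]))
  have n5 : ¬ (("buy-coins" : String) = "buy-" ++ s) := by
    intro h; have := congrArg String.toList h; simp at this
    exact e5 (String.toList_inj.mp (by simp [this.symm]))
  have n6 : ¬ (("sell-account" : String) = "buy-" ++ s) := by
    intro h; have := congrArg String.toList h; simp at this
  have n7 : ¬ (("sell-profile" : String) = "buy-" ++ s) := by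
    intro h; have := congrArg String.toList h; simp at this
  have n8 : ¬ (("sell-alt" : String) = "buy-" ++ s) := by
    intro h; have := congrArg String.toList h; simp at this
  have n9 : ¬ (("sell-mfa" : String) = "buy-" ++ s) := by
    intro h; have := congrArg String.toList h; simp at this
  have n10 : ¬ (("sell-coins" : String) = "buy-" ++ s) := by
    intro h; have := congrArg String.toList h; simp at this
  have n11 : ¬ (("middleman" : String) = "buy-" ++ s) := by
    intro h; have := congrArg String.toList h; simp at this
  simp [pvLit, PySem.Dict.contains, pvRoleForSuffix,
    n1, n2, n3, n4, n5, n6, n7, n8, n9, n10, n11, e1, e2, e3, e4, e5]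

theorem pv_main_sell (s : String) : get_role_config_name ("sell-" ++ s) = pvRoleForSuffix s := by
  by_cases e1 : s = "account"; · subst e1; decide
  by_cases e2 : s = "profile"; · subst e2; decide
  by_cases e3 : s = "alt"; · subst e3; decide
  by_cases e4 : s = "mfa"; · subst e4; decide
  by_cases e5 : s = "coins"; · subst e5; decide
  rw [pv_A_eval]
  have n1 : ¬ (("sell-account" : String) = "sell-" ++ s) := by
    intro h; have := congrArg String.toList h; simp at this
    exact e1 (String.toList_inj.mp (by simp [this.symm]))
  have n2 : ¬ (("sell-profile" : String) = "sell-" ++ s) := by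
    intro h; have := congrArg String.toList h; simp at this
    exact e2 (String.toList_inj.mp (by simp [this.symm]))
  have n3 : ¬ (("sell-alt" : String) = "sell-" ++ s) := by
    intro h; have := congrArg String.toList h; simp at this
    exact e3 (String.toList_inj.mp (by simp [this.symm]))
  have n4 : ¬ (("sell-mfa" : String) = "sell-" ++ s) := by
    intro h; have := congrArg String.toList h; simp at this
    exact e4 (String.toList_inj.mp (by simp [this.symm]))
  have n5 : ¬ (("sell-coins" : String) = "sell-" ++ s) := by
    intro h; have := congrArg String.toList h; simp at this
    exact e5 (String.toList_inj.mp (by simp [this.symm]))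
  have n6 : ¬ (("buy-account" : String) = "sell-" ++ s) := by
    intro h; have := congrArg String.toList h; simp at this
  have n7 : ¬ (("buy-profile" : String) = "sell-" ++ s) := by
    intro h; have := congrArg String.toList h; simp at this
  have n8 : ¬ (("buy-alt" : String) = "sell-" ++ s) := by
    intro h; have := congrArg String.toList h; simp at this
  have n9 : ¬ (("buy-mfa" : String) = "sell-" ++ s) := by
    intro h; have := congrArg String.toList h; simp at this
  have n10 : ¬ (("buy-coins" : String) = "sell-" ++ s) := by
    intro h; have := congrArg String.toList h; simp at this
  have n11 : ¬ (("middleman" : String) = "sell-" ++ s) := by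
    intro h; have := congrArg String.toList h; simp at this
  simp [pvLit, PySem.Dict.contains, pvRoleForSuffix,
    n1, n2, n3, n4, n5, n6, n7, n8, n9, n10, n11, e1, e2, e3, e4, e5]

theorem pv_main_none (t : String) (hm : t ≠ "middleman")
    (hb : ¬ PySem.Str.startswith t "buy-" = true)
    (hs : ¬ PySem.Str.startswith t "sell-" = true) :
    get_role_config_name t = "seller_role" := by
  rw [pv_A_eval]
  have nb : ∀ x : String, PySem.Str.startswith x "buy-" = true → ¬ (x = t) := by
    intro x hx h; subst h; exact hb hx
  have ns : ∀ x : String, PySem.Str.startswith x "sell-" = true → ¬ (x = t) := by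
    intro x hx h; subst h; exact hs hx
  have n1 := nb "buy-account" (by decide)
  have n2 := nb "buy-profile" (by decide)
  have n3 := nb "buy-alt" (by decide)
  have n4 := nb "buy-mfa" (by decide)
  have n5 := nb "buy-coins" (by decide)
  have n6 := ns "sell-account" (by decide)
  have n7 := ns "sell-profile" (by decide)
  have n8 := ns "sell-alt" (by decide)
  have n9 := ns "sell-mfa" (by decide)
  have n10 := ns "sell-coins" (by decide)
  have n11 : ¬ (("middleman" : String) = t) := fun h => hm h.symm
  simp [pvLit, PySem.Dict.contains,
    n1, n2, n3, n4, n5, n6, n7, n8, n9, n10, n11]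

theorem pv_main (t : String) : get_role_config_name t = get_role_config_name_alt t := by
  by_cases hm : t = "middleman"
  · subst hm; decide
  by_cases hb : PySem.Str.startswith t "buy-" = true
  · have hb' : PySem.Chars.startswith t.toList ['b','u','y','-'] = true := by simpa using hb
    have hB : get_role_config_name_alt t =
        pvRoleForSuffix (PySem.Str.slice t (some 4) none) := by
      simp [get_role_config_name_alt, hb', hm]
    rw [hB]
    conv_lhs => rw [pv_buy_decomp t hb]
    exact pv_main_buy _
  by_cases hs : PySem.Str.startswith t "sell-" = true
  · have hb' : ¬ PySem.Chars.startswith t.toList ['b','u','y','-'] = true := by simpa using hb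
    have hs' : PySem.Chars.startswith t.toList ['s','e','l','l','-'] = true := by simpa using hs
    have hB : get_role_config_name_alt t =
        pvRoleForSuffix (PySem.Str.slice t (some 5) none) := by
      simp [get_role_config_name_alt, hs', hm, hb']
    rw [hB]
    conv_lhs => rw [pv_sell_decomp t hs]
    exact pv_main_sell _
  · have hb' : ¬ PySem.Chars.startswith t.toList ['b','u','y','-'] = true := by simpa using hb
    have hs' : ¬ PySem.Chars.startswith t.toList ['s','e','l','l','-'] = true := by simpa using hs
    have hB : get_role_config_name_alt t = "seller_role" := by
      simp [get_role_config_name_alt, hb', hs', hm]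
    rw [hB]
    exact pv_main_none t hm hb hs

-- ===== VERDICT (by name: the statement is the Claim_ definition above) =====
theorem get_role_config_name_spec : Claim_equal_get_role_config_name := by
  intro t _
  unfold Spec_get_role_config_name
  exact pv_main t
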